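-- pv_equiv track=rewrite | github.com/GabrieleMazzola/crowd_computing_group10 | explanation/util/util.py | create_label_person_only
-- ===== SOURCE A (Python) =====
-- def create_label_person_only(close_person_list, distant_people_num):
--     if len(close_person_list) == 0:
--         return create_label_anonymous(len(close_person_list) + distant_people_num)
--
--     to_return_label = ""
--
--     for i, close_person in enumerate(close_person_list):
--         to_return_label += close_person
--         if if_last_but_one(close_person_list, i):
--             to_return_label += " and "
--         elif i < len(close_person_list) - 2:
--             to_return_label += ", "
--     return to_return_label
--
-- def create_label_anonymous(num_all_people):
--     if num_all_people > 1:
--         return "some people from the group"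
--     return "someone from the group"
--
-- def if_last_but_one(label_list, i):
--     return i == len(label_list) - 2
-- ===== SOURCE B (Python) =====
-- def create_label_person_only(close_person_list, distant_people_num):
--     if len(close_person_list) == 0:
--         return create_label_anonymous(distant_people_num)
--     if len(close_person_list) == 1:
--         return close_person_list[0]
--     return ", ".join(close_person_list[:-1]) + " and " + close_person_list[-1]
--
--
-- def create_label_anonymous(num_all_people):
--     if num_all_people > 1:
--         return "some people from the group"
--     return "someone from the group"
-- ===== Notes on version B (the rewrite author's own statement) =====
-- stated objective: simpler
-- what changed: Replaces the index-inspecting accumulation loop (per-element last-but-one / i<len-2 branching and repeated string +=) with explicit 0/1-element cases plus a single ', '.join over the list minus its last element followed by ' and ' + last; no per-element index comparisons remain.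
import Mathlib
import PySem

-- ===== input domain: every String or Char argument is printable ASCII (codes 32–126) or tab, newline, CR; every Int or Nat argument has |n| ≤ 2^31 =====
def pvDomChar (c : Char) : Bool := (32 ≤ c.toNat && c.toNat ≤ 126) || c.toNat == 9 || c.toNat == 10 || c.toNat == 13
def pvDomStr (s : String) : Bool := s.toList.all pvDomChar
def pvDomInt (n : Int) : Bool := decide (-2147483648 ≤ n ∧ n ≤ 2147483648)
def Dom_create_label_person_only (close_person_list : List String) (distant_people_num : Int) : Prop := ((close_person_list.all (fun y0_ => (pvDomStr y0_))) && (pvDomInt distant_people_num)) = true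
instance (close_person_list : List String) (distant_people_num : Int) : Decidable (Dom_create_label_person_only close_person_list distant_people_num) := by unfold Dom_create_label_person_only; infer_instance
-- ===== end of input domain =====

-- B replaces A's index-inspecting accumulation loop with 0/1-element cases plus join over the
-- list minus its last element followed by " and " + last element (objective: simpler).

-- ===== PORT A =====
def create_label_anonymous (num_all_people : Int) : String :=
  if num_all_people > 1 then "some people from the group"
  else "someone from the group"

def if_last_but_one (label_list : List String) (i : Int) : Bool :=
  i == (label_list.length : Int) - 2

def create_label_person_only (close_person_list : List String) (distant_people_num : Int) : String :=
  if close_person_list.length == 0 then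
    create_label_anonymous ((close_person_list.length : Int) + distant_people_num)
  else
    (PySem.List.enumerate close_person_list).foldl
      (fun to_return_label p =>
        let to_return_label := to_return_label ++ p.2
        if if_last_but_one close_person_list p.1 then to_return_label ++ " and "
        else if p.1 < (close_person_list.length : Int) - 2 then to_return_label ++ ", "
        else to_return_label) ""

-- ===== PORT B =====
def create_label_person_only_alt (close_person_list : List String) (distant_people_num : Int) : String :=
  match close_person_list with
  | [] => create_label_anonymous distant_people_num
  | [x] => x
  | x :: y :: rest =>
      PySem.Str.join ", " (PySem.List.slice (x :: y :: rest) none (some (-1)))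
        ++ " and " ++ (x :: y :: rest).getLast (by simp)

-- ===== PRECONDITION & SPEC =====
def Spec_create_label_person_only (close_person_list : List String) (distant_people_num : Int) (out : String) : Prop := out = create_label_person_only_alt close_person_list distant_people_num
instance (close_person_list : List String) (distant_people_num : Int) (out : String) : Decidable (Spec_create_label_person_only close_person_list distant_people_num out) := by unfold Spec_create_label_person_only; infer_instance

-- ===== CLAIM (what is proved, stated in full; the proofs are below) =====
def Claim_equal_create_label_person_only : Prop := ∀ (close_person_list : List String) (distant_people_num : Int), Dom_create_label_person_only close_person_list distant_people_num → Spec_create_label_person_only close_person_list distant_people_num (create_label_person_only close_person_list distant_people_num)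

-- ===== LEMMAS AND PROOFS =====

-- canonical form of the joined label for a nonempty list
def pvG : List String → String
  | [] => ""
  | [x] => x
  | [x, y] => x ++ " and " ++ y
  | x :: y :: z :: r => x ++ ", " ++ pvG (y :: z :: r)

theorem pv_join_cons_cons (sep x y : String) (l : List String) :
    PySem.Str.join sep (x :: y :: l) = x ++ sep ++ PySem.Str.join sep (y :: l) := by
  simp [PySem.Str.join, PySem.Chars.join_cons_cons, String.append_assoc]

theorem pv_join_singleton (sep x : String) : PySem.Str.join sep [x] = x := by
  simp [PySem.Str.join, PySem.Chars.join_singleton]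

-- B's join-and-last form computes pvG
theorem pv_alt_eq_pvG : ∀ (rest : List String) (x y : String),
    PySem.Str.join ", " ((x :: y :: rest).dropLast) ++ " and "
      ++ (x :: y :: rest).getLast (by simp) = pvG (x :: y :: rest) := by
  intro rest
  induction rest with
  | nil =>
      intro x y
      simp [pvG, pv_join_singleton]
  | cons z r ih =>
      intro x y
      have h := ih y z
      simp only [List.dropLast_cons₂, pv_join_cons_cons, pvG] at *
      rw [← h]
      simp [String.append_assoc]

-- A's loop (let-reduced body), run over a suffix of the full list, appends pvG of that suffix
theorem pv_loopA (L : List String) : ∀ (xs : List String) (s : Nat) (acc : String),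
    s + xs.length = L.length →
    (PySem.List.enumerate xs (s : Int)).foldl
      (fun acc p =>
        if if_last_but_one L p.1 then acc ++ p.2 ++ " and "
        else if p.1 < (L.length : Int) - 2 then acc ++ p.2 ++ ", "
        else acc ++ p.2) acc = acc ++ pvG xs := by
  intro xs
  induction xs with
  | nil => intro s acc _; simp [PySem.List.enumerate, pvG]
  | cons x rest ih =>
      intro s acc hs
      rw [PySem.List.enumerate_cons, List.foldl_cons,
          show ((s : Int) + 1) = ((s + 1 : Nat) : Int) by push_cast; ring]
      simp only [List.length_cons] at hs
      match rest with
      | [] =>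
          simp only [List.length_nil] at hs
          have h1 : ¬ ((s : Int) = (L.length : Int) - 2) := by omega
          have h2 : ¬ ((s : Int) < (L.length : Int) - 2) := by omega
          simp [PySem.List.enumerate, if_last_but_one, h1, h2, pvG]
      | [y] =>
          simp only [List.length_cons, List.length_nil] at hs
          rw [ih (s + 1) _ (by simp; omega)]
          have h1 : ((s : Int) = (L.length : Int) - 2) := by omega
          simp [if_last_but_one, h1, pvG, String.append_assoc]
      | y :: z :: r =>
          simp only [List.length_cons] at hs
          rw [ih (s + 1) _ (by simp; omega)]
          have h1 : ¬ ((s : Int) = (L.length : Int) - 2) := by omega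
          have h2 : ((s : Int) < (L.length : Int) - 2) := by omega
          simp [if_last_but_one, h1, h2, pvG, String.append_assoc]

-- ===== VERDICT (by name: the statement is the Claim_ definition above) =====
theorem create_label_person_only_spec : Claim_equal_create_label_person_only := by
  intro xs n _
  unfold Spec_create_label_person_only create_label_person_only create_label_person_only_alt
  match xs with
  | [] => simp [create_label_anonymous]
  | [x] =>
      have hl := pv_loopA [x] [x] 0 "" (by simp)
      simp only [Nat.cast_zero] at hl
      show (if (([x] : List String).length == 0) = true then _ else
        (PySem.List.enumerate [x] 0).foldl
          (fun acc p =>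
            if if_last_but_one [x] p.1 then acc ++ p.2 ++ " and "
            else if p.1 < (([x] : List String).length : Int) - 2 then acc ++ p.2 ++ ", "
            else acc ++ p.2) "") = x
      rw [if_neg (by simp), hl]
      simp [pvG]
  | x :: y :: rest =>
      have hl := pv_loopA (x :: y :: rest) (x :: y :: rest) 0 "" (by simp)
      simp only [Nat.cast_zero] at hl
      show (if ((x :: y :: rest).length == 0) = true then _ else
        (PySem.List.enumerate (x :: y :: rest) 0).foldl
          (fun acc p =>
            if if_last_but_one (x :: y :: rest) p.1 then acc ++ p.2 ++ " and "
            else if p.1 < ((x :: y :: rest).length : Int) - 2 then acc ++ p.2 ++ ", "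
            else acc ++ p.2) "")
        = PySem.Str.join ", " (PySem.List.slice (x :: y :: rest) none (some (-1)))
            ++ " and " ++ (x :: y :: rest).getLast (by simp)
      rw [if_neg (by simp), hl, PySem.List.slice_to_neg_one, ← pv_alt_eq_pvG rest x y]
      simp
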